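-- pv_equiv track=rewrite | github.com/ecoffie/Bootcamp | create-bootcamp-files.py | filter_low_competition
-- ===== SOURCE A (Python) =====
-- def filter_low_competition(opportunities):
--     """Filter for low competition opportunities"""
--     low_comp = []
--
--     for opp in opportunities:
--         set_aside = opp.get('Set-Aside', '').lower()
--
--         # Must have set-aside
--         if 'small business' in set_aside or '8(a)' in set_aside or 'wosb' in set_aside or 'sdvosb' in set_aside or 'hubzone' in set_aside:
--             low_comp.append(opp)
--
--     # Sort by response date (earliest first)
--     low_comp.sort(key=lambda x: x.get('Current Response Date', '9999-99-99'))
--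
--     return low_comp[:34]  # Top 34
-- ===== SOURCE B (Python) =====
-- def filter_low_competition(opportunities):
--     """Low-competition set-aside opportunities: online top-34 selection by response date."""
--     KEYWORDS = ('small business', '8(a)', 'wosb', 'sdvosb', 'hubzone')
--
--     def date(opp):
--         return opp.get('Current Response Date', '9999-99-99')
--
--     top = []  # at most 34 opportunities, kept ordered by response date (stable)
--     for opp in opportunities:
--         sa = opp.get('Set-Aside', '').lower()
--         if any(kw in sa for kw in KEYWORDS):
--             i = len(top)
--             while i > 0 and date(top[i - 1]) > date(opp):
--                 i -= 1
--             top.insert(i, opp)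
--             if len(top) > 34:
--                 top.pop()
--     return top
-- ===== Notes on version B (the rewrite author's own statement) =====
-- stated objective: alternative
-- what changed: A filters everything into a list, stable-sorts the whole filtered list by response date and slices off the first 34; B makes a single online pass that keeps a bounded (at most 34 element) date-ordered buffer, inserting each qualifying opportunity by a right-to-left scan and dropping the last element on overflow, so no full sort and no slicing happen.
import Mathlib
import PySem

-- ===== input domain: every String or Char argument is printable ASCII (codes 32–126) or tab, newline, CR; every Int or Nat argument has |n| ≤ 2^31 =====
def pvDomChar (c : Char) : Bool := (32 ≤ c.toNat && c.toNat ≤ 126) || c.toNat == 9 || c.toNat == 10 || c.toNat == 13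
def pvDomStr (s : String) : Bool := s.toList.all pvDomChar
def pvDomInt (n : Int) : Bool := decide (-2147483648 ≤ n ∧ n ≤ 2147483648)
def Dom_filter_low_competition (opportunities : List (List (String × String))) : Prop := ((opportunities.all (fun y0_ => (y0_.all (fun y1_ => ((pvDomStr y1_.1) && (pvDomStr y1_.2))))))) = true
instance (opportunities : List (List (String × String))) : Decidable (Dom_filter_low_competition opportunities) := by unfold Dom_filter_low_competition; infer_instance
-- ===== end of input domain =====

-- B replaces A's filter-everything / full stable sort / [:34] pipeline by a single online pass
-- keeping a bounded (≤ 34) buffer ordered by response date; same return value, different algorithm.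

-- ===== PORT A =====
def filter_low_competition (opportunities : List (List (String × String))) : List (List (String × String)) :=
  let low_comp := opportunities.foldl (fun (low_comp : List (List (String × String))) (opp : List (String × String)) =>
    let set_aside := PySem.Str.lower (PySem.Dict.getD (PySem.Dict.mk opp) "Set-Aside" "")
    if PySem.Str.isIn "small business" set_aside || PySem.Str.isIn "8(a)" set_aside ||
       PySem.Str.isIn "wosb" set_aside || PySem.Str.isIn "sdvosb" set_aside ||
       PySem.Str.isIn "hubzone" set_aside
    then low_comp ++ [opp] else low_comp) []
  PySem.List.slice
    (PySem.List.sorted low_comp (fun x => PySem.Dict.getD (PySem.Dict.mk x) "Current Response Date" "9999-99-99"))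
    none (some 34)

-- ===== PORT B =====
def pvKeywords : List String := ["small business", "8(a)", "wosb", "sdvosb", "hubzone"]

def pvDate (opp : List (String × String)) : String :=
  PySem.Dict.getD (PySem.Dict.mk opp) "Current Response Date" "9999-99-99"

-- port of B's scan `i = len(top); while i > 0 and date(top[i-1]) > date(opp): i -= 1`
def pvInsPos (k : String) (top : List (List (String × String))) : Nat → Nat
  | 0 => 0
  | i + 1 => if k < pvDate (top.getD i []) then pvInsPos k top i else i + 1

-- port of B's `top.insert(i, opp)` followed by `if len(top) > 34: top.pop()`
def pvPush (top : List (List (String × String))) (opp : List (String × String)) : List (List (String × String)) :=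
  let top' := top.insertIdx (pvInsPos (pvDate opp) top top.length) opp
  if top'.length > 34 then top'.dropLast else top'

def filter_low_competition_alt (opportunities : List (List (String × String))) : List (List (String × String)) :=
  opportunities.foldl (fun (top : List (List (String × String))) (opp : List (String × String)) =>
    if pvKeywords.any (fun kw => PySem.Str.isIn kw (PySem.Str.lower (PySem.Dict.getD (PySem.Dict.mk opp) "Set-Aside" "")))
    then pvPush top opp else top) []

-- ===== PRECONDITION & SPEC =====
def Spec_filter_low_competition (opportunities : List (List (String × String))) (out : List (List (String × String))) : Prop := out = filter_low_competition_alt opportunities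
instance (opportunities : List (List (String × String))) (out : List (List (String × String))) : Decidable (Spec_filter_low_competition opportunities out) := by unfold Spec_filter_low_competition; infer_instance

-- ===== CLAIM (what is proved, stated in full; the proofs are below) =====
def Claim_equal_filter_low_competition : Prop := ∀ (opportunities : List (List (String × String))), Dom_filter_low_competition opportunities → Spec_filter_low_competition opportunities (filter_low_competition opportunities)

-- ===== LEMMAS AND PROOFS =====

-- the two membership tests (A's or-chain, B's any over pvKeywords) agree
def pvCond (opp : List (String × String)) : Bool :=
  let set_aside := PySem.Str.lower (PySem.Dict.getD (PySem.Dict.mk opp) "Set-Aside" "")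
  PySem.Str.isIn "small business" set_aside || PySem.Str.isIn "8(a)" set_aside ||
  PySem.Str.isIn "wosb" set_aside || PySem.Str.isIn "sdvosb" set_aside ||
  PySem.Str.isIn "hubzone" set_aside

theorem pvCond_eq (opp : List (String × String)) :
    (pvKeywords.any (fun kw => PySem.Str.isIn kw (PySem.Str.lower (PySem.Dict.getD (PySem.Dict.mk opp) "Set-Aside" "")))) = pvCond opp := by
  simp [pvKeywords, pvCond, Bool.or_assoc]

-- abbreviation for stable insertion by date used by PySem.List.sorted
def pvIns (x : List (String × String)) (s : List (List (String × String))) : List (List (String × String)) :=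
  PySem.List.insertBy (fun a b => decide (pvDate a < pvDate b)) x s

theorem pvInsPos_le (k : String) (top : List (List (String × String))) (i : Nat) :
    pvInsPos k top i ≤ i := by
  induction i with
  | zero => simp [pvInsPos]
  | succ i ih => simp only [pvInsPos]; split <;> omega

theorem pvInsPos_append (k : String) (top : List (List (String × String))) (y : List (String × String))
    (i : Nat) (h : i ≤ top.length) : pvInsPos k (top ++ [y]) i = pvInsPos k top i := by
  induction i with
  | zero => rfl
  | succ i ih =>
      simp only [pvInsPos]
      rw [List.getD_append _ _ _ _ (by omega), ih (by omega)]

theorem pvInsertIdx_append (l : List (List (String × String))) (y x : List (String × String))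
    (n : Nat) (h : n ≤ l.length) : (l ++ [y]).insertIdx n x = l.insertIdx n x ++ [y] := by
  induction l generalizing n with
  | nil =>
      have hn : n = 0 := by simp at h; omega
      subst hn; rfl
  | cons a l ih =>
      cases n with
      | zero => rfl
      | succ m =>
          simp only [List.cons_append, List.insertIdx_succ_cons, List.cons_append]
          rw [ih m (by simpa using h)]

theorem pvInsertIdx_length (l : List (List (String × String))) (x : List (String × String)) :
    l.insertIdx l.length x = l ++ [x] := by
  induction l with
  | nil => rfl
  | cons a l _ => simp [List.insertIdx_succ_cons]

theorem pvGetD_append_length (l : List (List (String × String))) (y : List (String × String)) :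
    (l ++ [y]).getD l.length [] = y := by
  induction l with
  | nil => rfl
  | cons a l _ => simp

theorem pvIns_append (l : List (List (String × String))) (y x : List (String × String))
    (h : pvDate x < pvDate y) : pvIns x (l ++ [y]) = pvIns x l ++ [y] := by
  have h' : decide (pvDate x < pvDate y) = true := decide_eq_true h
  induction l with
  | nil =>
      simp only [List.nil_append, pvIns, PySem.List.insertBy, h', if_true]
      rfl
  | cons a l ih =>
      simp only [pvIns, List.cons_append, PySem.List.insertBy] at *
      by_cases hba : decide (pvDate x < pvDate a) = true
      · simp only [hba, if_true, List.cons_append]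
      · simp only [hba, if_false, Bool.false_eq_true, List.cons_append, List.cons.injEq, true_and]
        exact ih

-- the right-to-left scan plus insert equals stable insertion-by-date into a date-ordered buffer
theorem pvInsert_scan_eq (T : List (List (String × String))) (x : List (String × String))
    (hT : List.Pairwise (fun a b => pvDate a ≤ pvDate b) T) :
    T.insertIdx (pvInsPos (pvDate x) T T.length) x = pvIns x T := by
  induction T using List.reverseRecOn with
  | nil => rfl
  | append_singleton l y ih =>
      have hlen : (l ++ [y]).length = l.length + 1 := by simp
      rw [hlen]
      have hpair := (List.pairwise_append.mp hT)
      simp only [pvInsPos]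
      rw [pvGetD_append_length]
      by_cases h : pvDate x < pvDate y
      · simp only [if_pos h]
        rw [pvInsPos_append _ _ _ _ (le_refl _),
            pvInsertIdx_append _ _ _ _ (pvInsPos_le _ _ _),
            ih hpair.1, pvIns_append _ _ _ h]
      · simp only [if_neg h]
        rw [show l.length + 1 = (l ++ [y]).length by simp, pvInsertIdx_length]
        rw [pvIns, PySem.List.insertBy_of_forall_not_before]
        intro z hz
        rcases List.mem_append.mp hz with hz | hz
        · have h1 : pvDate z ≤ pvDate y := hpair.2.2 z hz y (by simp)
          simp only [decide_eq_false_iff_not, not_lt]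
          exact le_trans h1 (not_lt.mp h)
        · simp only [List.mem_singleton] at hz
          subst hz
          simpa using h
      
-- truncating to n after inserting into the truncated buffer = truncating the full stable insert
theorem pvIns_take (S : List (List (String × String))) (x : List (String × String)) (n : Nat) :
    List.take n (pvIns x (List.take n S)) = List.take n (pvIns x S) := by
  induction S generalizing n with
  | nil => simp
  | cons a S ih =>
      cases n with
      | zero => simp
      | succ m =>
          simp only [List.take_succ_cons, pvIns, PySem.List.insertBy]
          split
          · simp only [List.take_succ_cons]
            congr 1
            cases m with
            | zero => simp
            | succ j =>
                simp [List.take_take]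
          · simp only [List.take_succ_cons]
            congr 1
            exact ih m

theorem pvSorted_append (l : List (List (String × String))) (x : List (String × String)) :
    PySem.List.sorted (l ++ [x]) pvDate false = pvIns x (PySem.List.sorted l pvDate false) := by
  rw [PySem.List.sorted_eq_foldl_insertBy, PySem.List.sorted_eq_foldl_insertBy, List.foldl_append]
  rfl

theorem pvPush_take (S : List (List (String × String))) (x : List (String × String))
    (hS : List.Pairwise (fun a b => pvDate a ≤ pvDate b) S) :
    pvPush (List.take 34 S) x = List.take 34 (pvIns x S) := by
  have hT : List.Pairwise (fun a b => pvDate a ≤ pvDate b) (List.take 34 S) :=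
    List.Pairwise.sublist (List.take_sublist _ _) hS
  have hpos : pvInsPos (pvDate x) (List.take 34 S) (List.take 34 S).length ≤ (List.take 34 S).length :=
    pvInsPos_le _ _ _
  have hscan := pvInsert_scan_eq (List.take 34 S) x hT
  have hlen : (pvIns x (List.take 34 S)).length = (List.take 34 S).length + 1 := by
    rw [← hscan, List.length_insertIdx, if_pos hpos]
  have htk : (List.take 34 S).length ≤ 34 := by simp
  rw [← pvIns_take S x 34, pvPush, hscan, hlen]
  by_cases hfull : (List.take 34 S).length + 1 > 34
  · rw [if_pos hfull, List.dropLast_eq_take, hlen]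
    congr 1
    omega
  · rw [if_neg hfull,
        List.take_of_length_le (show (pvIns x (List.take 34 S)).length ≤ 34 by omega)]

theorem pvFold_push (l : List (List (String × String))) :
    l.foldl pvPush [] = List.take 34 (PySem.List.sorted l pvDate false) := by
  induction l using List.reverseRecOn with
  | nil => rfl
  | append_singleton l x ih =>
      rw [List.foldl_append, List.foldl_cons, List.foldl_nil, ih, pvSorted_append,
          pvPush_take _ _ (PySem.List.sorted_pairwise l pvDate)]

theorem pvA_char (opps : List (List (String × String))) :
    filter_low_competition opps
      = List.take 34 (PySem.List.sorted (List.filter pvCond opps) pvDate false) := by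
  show PySem.List.slice
      (PySem.List.sorted
        (opps.foldl (fun acc opp => if pvCond opp then acc ++ [opp] else acc) []) pvDate false)
      none (some 34) = _
  rw [PySem.List.foldl_append_if_eq_filter pvCond opps [], List.nil_append,
      PySem.List.slice_to _ (by norm_num)]
  rfl

theorem pvB_char (opps : List (List (String × String))) :
    filter_low_competition_alt opps
      = List.take 34 (PySem.List.sorted (List.filter pvCond opps) pvDate false) := by
  unfold filter_low_competition_alt
  have hstep : ∀ (top : List (List (String × String))) (opp : List (String × String)), opp ∈ opps →
      (if (pvKeywords.any fun kw =>
            PySem.Str.isIn kw (PySem.Str.lower (PySem.Dict.getD (PySem.Dict.mk opp) "Set-Aside" ""))) = true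
       then pvPush top opp else top)
      = (if pvCond opp then pvPush top opp else top) := by
    intro top opp _
    rw [pvCond_eq]
  rw [PySem.List.foldl_congr_mem opps _
        (fun top opp => if pvCond opp then pvPush top opp else top) [] hstep,
      PySem.List.foldl_if_eq_foldl_filter pvCond pvPush opps [], pvFold_push]

-- ===== VERDICT (by name: the statement is the Claim_ definition above) =====
theorem filter_low_competition_spec : Claim_equal_filter_low_competition := by
  intro opportunities _
  unfold Spec_filter_low_competition
  rw [pvA_char, pvB_char]
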